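-- pv_equiv track=rewrite | github.com/Victor-Rodriguez-VR/Coding-challenges | differentLights.py | light_period
-- ===== SOURCE A (Python) =====
-- def light_period(measurements):
--   low = []
--   on = []
--   dim = []
--   lowDim = []
--   spike = False
--   wasOn = True
--
--   for character in range(len(measurements)):
--     if(spike == False and measurements[character] < 10):
--       low.append(measurements[character])
--     if(measurements[character] > 60):
--       spike = True
--       on.append(measurements[character])
--   if(len(low) >=5 and len(on)>=20):
--     return "halo"
--   elif(len(low)<5 and len(on)>=20):
--     return "flor"
--   elif( len(low) >=5 and len(on)>=15):
--     return "Ican"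
--   else:
--     return "led"
-- ===== SOURCE B (Python) =====
-- def light_period(measurements):
--     boundary = next((i for i, v in enumerate(measurements) if v > 60), len(measurements))
--     low = sum(1 for v in measurements[:boundary] if v < 10)
--     on = sum(1 for v in measurements if v > 60)
--     if low >= 5 and on >= 20:
--         return "halo"
--     elif low < 5 and on >= 20:
--         return "flor"
--     elif low >= 5 and on >= 15:
--         return "Ican"
--     else:
--         return "led"
-- ===== Notes on version B (the rewrite author's own statement) =====
-- stated objective: simpler
-- what changed: Replaces A's single index loop with list-growing accumulators and a spike flag by a boundary-finding step (first index > 60) plus two independent counts (lows in the prefix before the boundary, ons over the whole list), feeding the same four-way branch ladder.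
import Mathlib
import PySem

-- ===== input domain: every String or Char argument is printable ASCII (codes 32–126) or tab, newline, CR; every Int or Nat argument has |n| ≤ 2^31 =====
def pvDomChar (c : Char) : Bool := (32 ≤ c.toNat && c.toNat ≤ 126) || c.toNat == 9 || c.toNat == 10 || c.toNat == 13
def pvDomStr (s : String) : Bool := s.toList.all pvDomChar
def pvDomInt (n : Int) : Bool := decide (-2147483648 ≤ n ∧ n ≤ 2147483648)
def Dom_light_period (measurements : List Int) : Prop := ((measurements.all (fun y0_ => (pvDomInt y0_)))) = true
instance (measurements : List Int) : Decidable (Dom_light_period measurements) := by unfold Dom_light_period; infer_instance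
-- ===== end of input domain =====

-- B is simpler: a boundary-finding step plus two independent counts instead of A's flag-gated accumulator loop; same return value.

-- ===== PORT A =====
-- one iteration of A's loop body, state = (low, on, spike)
def pvStepA (st : List Int × List Int × Bool) (v : Int) : List Int × List Int × Bool :=
  let st1 := if st.2.2 = false ∧ v < 10 then (st.1 ++ [v], st.2.1, st.2.2) else st
  if v > 60 then (st1.1, st1.2.1 ++ [v], true) else st1

def light_period (measurements : List Int) : String :=
  let st := (PySem.List.pyRange 0 (PySem.List.len measurements) 1).foldl
    (fun st i => pvStepA st (PySem.List.pyGetD measurements i 0)) ([], [], false)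
  if st.1.length ≥ 5 ∧ st.2.1.length ≥ 20 then "halo"
  else if st.1.length < 5 ∧ st.2.1.length ≥ 20 then "flor"
  else if st.1.length ≥ 5 ∧ st.2.1.length ≥ 15 then "Ican"
  else "led"

-- ===== PORT B =====
-- next((i for i, v in enumerate(ms) if v > 60), len(ms))
def pvBoundary : List Int → Int
  | [] => 0
  | v :: rest => if v > 60 then 0 else 1 + pvBoundary rest

def light_period_alt (measurements : List Int) : String :=
  let boundary := pvBoundary measurements
  let low := (PySem.List.slice measurements none (some boundary)).countP (fun v => decide (v < 10))
  let on := measurements.countP (fun v => decide (v > 60))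
  if low ≥ 5 ∧ on ≥ 20 then "halo"
  else if low < 5 ∧ on ≥ 20 then "flor"
  else if low ≥ 5 ∧ on ≥ 15 then "Ican"
  else "led"

-- ===== PRECONDITION & SPEC =====
def Spec_light_period (measurements : List Int) (out : String) : Prop := out = light_period_alt measurements
instance (measurements : List Int) (out : String) : Decidable (Spec_light_period measurements out) := by unfold Spec_light_period; infer_instance

-- ===== CLAIM (what is proved, stated in full; the proofs are below) =====
def Claim_equal_light_period : Prop := ∀ (measurements : List Int), Dom_light_period measurements → Spec_light_period measurements (light_period measurements)

-- ===== LEMMAS AND PROOFS =====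

theorem pvStepA_spike_true (low on : List Int) (v : Int) :
    pvStepA (low, on, true) v = (low, if v > 60 then on ++ [v] else on, true) := by
  simp [pvStepA]; split_ifs <;> simp

theorem foldl_spike_true (xs : List Int) : ∀ low on : List Int,
    xs.foldl pvStepA (low, on, true) =
      (low, on ++ xs.filter (fun v => decide (v > 60)), true) := by
  induction xs with
  | nil => simp
  | cons v rest ih =>
    intro low on
    simp only [List.foldl_cons, pvStepA_spike_true, List.filter_cons]
    by_cases h : v > 60 <;> simp [h, ih]

theorem foldl_spike_false (xs : List Int) : ∀ low on : List Int,
    ∃ b, xs.foldl pvStepA (low, on, false) =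
      (low ++ (xs.takeWhile (fun v => decide (v ≤ 60))).filter (fun v => decide (v < 10)),
       on ++ xs.filter (fun v => decide (v > 60)), b) := by
  induction xs with
  | nil => intro low on; exact ⟨false, by simp⟩
  | cons v rest ih =>
    intro low on
    by_cases h : v > 60
    · refine ⟨true, ?_⟩
      have hle : ¬ (v ≤ 60) := by omega
      have h10 : ¬ (v < 10) := by omega
      simp only [List.foldl_cons, pvStepA, h10, h]
      simp [foldl_spike_true, h, hle]
    · have hle : v ≤ 60 := by omega
      by_cases h10 : v < 10
      · obtain ⟨b, hb⟩ := ih (low ++ [v]) on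
        refine ⟨b, ?_⟩
        simp only [List.foldl_cons, pvStepA, h10, h]
        simpa [hle, h10, h] using hb
      · obtain ⟨b, hb⟩ := ih low on
        refine ⟨b, ?_⟩
        simp only [List.foldl_cons, pvStepA, h10, h]
        simpa [hle, h10, h] using hb

theorem pvBoundary_nonneg (xs : List Int) : 0 ≤ pvBoundary xs := by
  induction xs with
  | nil => simp [pvBoundary]
  | cons v rest ih => simp only [pvBoundary]; split_ifs <;> omega

theorem take_pvBoundary (xs : List Int) :
    xs.take (pvBoundary xs).toNat = xs.takeWhile (fun v => decide (v ≤ 60)) := by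
  induction xs with
  | nil => simp
  | cons v rest ih =>
    by_cases h : v > 60
    · have : ¬ (v ≤ 60) := by omega
      simp [pvBoundary, h, this]
    · have hle : v ≤ 60 := by omega
      have hnn := pvBoundary_nonneg rest
      have ht : (1 + pvBoundary rest).toNat = (pvBoundary rest).toNat + 1 := by omega
      simp [pvBoundary, h, hle, ht, List.take_succ_cons, ih]

-- ===== VERDICT (by name: the statement is the Claim_ definition above) =====
theorem light_period_spec : Claim_equal_light_period := by
  intro ms _
  unfold Spec_light_period light_period light_period_alt
  rw [PySem.List.foldl_pyRange_zero_pyGetD ms 0 pvStepA ([], [], false)]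
  obtain ⟨b, hb⟩ := foldl_spike_false ms [] []
  have hs : PySem.List.slice ms none (some (pvBoundary ms)) = ms.take (pvBoundary ms).toNat :=
    PySem.List.slice_to ms (pvBoundary_nonneg ms)
  simp only [hb, hs, take_pvBoundary, List.countP_eq_length_filter]
  simp
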